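-- pv_equiv track=rewrite | github.com/ben-eliav/LogicAlgsHW1 | main.py | convert_and_to_or
-- ===== SOURCE A (Python) =====
-- def convert_and_to_or(constraints: list[list[int, int]]):
--     if len(constraints) == 1:
--         return constraints
--     elif len(constraints) == 2:
--         new_constraints = []
--         for c1 in constraints[0]:
--             for c2 in constraints[1]:
--                 new_constraints.append([c1, c2])
--         return new_constraints
--     else:
--         previous_constraints = convert_and_to_or(constraints[:-1])
--         new_constraints = []
--         for constraint in previous_constraints:
--             for c in constraints[-1]:
--                 new_constraints.append(constraint + [c])
--         return new_constraints
-- ===== SOURCE B (Python) =====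
-- def convert_and_to_or(constraints: list[list[int, int]]):
--     if len(constraints) == 1:
--         return constraints
--     result = [[c] for c in constraints[0]]
--     for lst in constraints[1:]:
--         result = [r + [c] for r in result for c in lst]
--     return result
-- ===== Notes on version B (the rewrite author's own statement) =====
-- stated objective: simpler
-- what changed: Replaces A's recursion that peels the last sublist off (rebuilding prefix products on the stack) with a single left-to-right fold that extends an accumulator of partial tuples with each sublist; same output order, no recursion.
import Mathlib
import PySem

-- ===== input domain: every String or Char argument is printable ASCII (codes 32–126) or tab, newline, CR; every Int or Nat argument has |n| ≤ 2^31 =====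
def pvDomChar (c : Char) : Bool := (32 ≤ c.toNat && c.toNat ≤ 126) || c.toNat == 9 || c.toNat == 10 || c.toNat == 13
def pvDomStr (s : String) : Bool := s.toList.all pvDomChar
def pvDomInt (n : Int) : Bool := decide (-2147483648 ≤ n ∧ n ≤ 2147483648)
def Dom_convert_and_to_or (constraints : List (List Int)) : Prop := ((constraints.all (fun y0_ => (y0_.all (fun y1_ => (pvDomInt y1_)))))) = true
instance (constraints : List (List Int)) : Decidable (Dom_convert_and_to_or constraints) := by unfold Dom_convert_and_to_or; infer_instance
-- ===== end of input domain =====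

-- B replaces A's peel-the-last-sublist recursion by a single left-to-right fold over the sublists (simpler, no recursion); A raises on the empty list, excluded by Pre_.


-- ===== PORT A =====
-- literal port of A; constraints[:-1] is List.dropLast, constraints[-1] is getLastD (both
-- exact here: the last branch only runs with length ≥ 3). The isEmpty guard only makes the
-- recursion total: Python A recurses forever (RecursionError) on [], which Pre_ excludes.
def convert_and_to_or (constraints : List (List Int)) : List (List Int) :=
  if constraints.length = 1 then constraints
  else if constraints.length = 2 then
    (constraints.headD []).foldl (fun acc c1 =>
      ((constraints.tail.headD []).foldl (fun acc2 c2 => acc2 ++ [[c1, c2]]) acc)) []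
  else if constraints.isEmpty then []   -- Python diverges here; outside Pre_
  else
    (convert_and_to_or constraints.dropLast).foldl (fun acc constraint =>
      ((constraints.getLastD []).foldl (fun acc2 c => acc2 ++ [constraint ++ [c]]) acc)) []
termination_by constraints.length
decreasing_by
  have h0 : constraints ≠ [] := by simp_all [List.isEmpty_iff]
  have h1 : constraints.length ≠ 0 := by simpa [List.length_eq_zero_iff]
  simp only [List.length_dropLast]
  omega

-- ===== PORT B =====
-- one fold step: result = [r + [c] for r in result for c in lst]
def pvStep (result : List (List Int)) (lst : List Int) : List (List Int) :=
  result.flatMap (fun r => lst.map (fun c => r ++ [c]))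

def convert_and_to_or_alt (constraints : List (List Int)) : List (List Int) :=
  if constraints.length = 1 then constraints
  else constraints.tail.foldl pvStep ((constraints.headD []).map (fun c => [c]))

-- ===== PRECONDITION & SPEC =====
-- Pre_ excludes only the empty list, on which Python A hits unbounded recursion (RecursionError).
def Pre_convert_and_to_or (constraints : List (List Int)) : Prop := constraints ≠ []
instance (constraints : List (List Int)) : Decidable (Pre_convert_and_to_or constraints) := by
  unfold Pre_convert_and_to_or; infer_instance
def pvWitness_convert_and_to_or : List (List Int) := [[1, 2], [3]]

def Spec_convert_and_to_or (constraints : List (List Int)) (out : List (List Int)) : Prop := out = convert_and_to_or_alt constraints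
instance (constraints : List (List Int)) (out : List (List Int)) : Decidable (Spec_convert_and_to_or constraints out) := by unfold Spec_convert_and_to_or; infer_instance

-- ===== CLAIM (what is proved, stated in full; the proofs are below) =====
def Claim_equal_convert_and_to_or : Prop := ∀ (constraints : List (List Int)), Dom_convert_and_to_or constraints → Pre_convert_and_to_or constraints → Spec_convert_and_to_or constraints (convert_and_to_or constraints)

-- ===== LEMMAS AND PROOFS =====

-- alt on a list of length ≥ 2 unfolds to the fold
theorem alt_of_ne_one (cs : List (List Int)) (h : cs.length ≠ 1) :
    convert_and_to_or_alt cs = cs.tail.foldl pvStep ((cs.headD []).map (fun c => [c])) := by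
  simp [convert_and_to_or_alt, h]

theorem A_eq_alt (cs : List (List Int)) (h : cs ≠ []) :
    convert_and_to_or cs = convert_and_to_or_alt cs := by
  induction hn : cs.length using Nat.strong_induction_on generalizing cs with
  | _ n ih =>
  subst hn
  match cs, h with
  | [a], _ =>
      rw [convert_and_to_or.eq_def]; simp [convert_and_to_or_alt]
  | [a, b], _ =>
      rw [convert_and_to_or.eq_def, alt_of_ne_one [a, b] (by simp)]
      rw [if_neg (show ¬([a, b].length = 1) by simp), if_pos (show [a, b].length = 2 by rfl)]
      simp only [List.headD_cons, List.tail_cons]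
      simp only [PySem.List.foldl_append_singleton_eq_map]
      rw [PySem.List.foldl_append_eq_flatMap]
      simp [pvStep, List.flatMap_map]
  | a :: b :: c :: t, _ =>
      rw [convert_and_to_or.eq_def]
      have h1 : ¬((a :: b :: c :: t).length = 1) := by simp
      have h2 : ¬((a :: b :: c :: t).length = 2) := by simp
      have h3 : ¬((a :: b :: c :: t).isEmpty = true) := by simp
      rw [if_neg h1, if_neg h2, if_neg h3]
      -- the inner double loop is one pvStep
      simp only [PySem.List.foldl_append_singleton_eq_map]
      rw [PySem.List.foldl_append_eq_flatMap]
      have hdlt : ((a :: b :: c :: t).dropLast).length < (a :: b :: c :: t).length := by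
        simp [List.length_dropLast]
      rw [ih _ hdlt _ (by simp [List.dropLast]) rfl]
      -- unfold alt on both the prefix and the whole list
      rw [alt_of_ne_one _ (by simp [List.length_dropLast] : ((a :: b :: c :: t).dropLast).length ≠ 1),
          alt_of_ne_one _ h1]
      have hne : (b :: c :: t) ≠ [] := by simp
      have hsplit : (b :: c :: t) = (b :: c :: t).dropLast ++ [(b :: c :: t).getLast hne] :=
        (List.dropLast_concat_getLast hne).symm
      conv_rhs => rw [show ((a :: b :: c :: t).tail) = (b :: c :: t) from rfl, hsplit]
      rw [List.foldl_append]
      simp [pvStep, List.dropLast, List.getLast?_eq_some_getLast]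

-- ===== VERDICT (by name: the statement is the Claim_ definition above) =====
theorem convert_and_to_or_spec : Claim_equal_convert_and_to_or := by
  intro cs _ hpre
  unfold Spec_convert_and_to_or
  exact A_eq_alt cs hpre
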